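-- pv_equiv track=rewrite | github.com/Vaynbaum/frequency-cryptanalysis | decrypt.py | __discard_rare
-- ===== SOURCE A (Python) =====
-- def __discard_rare(service_parts: dict):
--     "Отсеивание редких слов и группировка частых по их длине символов"
--     service_parts_by_len = {}
--     MIN_FREQUENCY_WORD = 25
--     for part in service_parts.items():
--         length = len(part[0])
--         if part[1] > MIN_FREQUENCY_WORD:
--             if length in service_parts_by_len:
--                 service_parts_by_len[length].append(part[0])
--             else:
--                 service_parts_by_len[length] = [part[0]]
--     return service_parts_by_len
-- ===== SOURCE B (Python) =====
-- def __discard_rare(service_parts: dict):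
--     "Filter-then-group decomposition: keep frequent words, then build each length bucket by a scan."
--     kept = [w for w, f in service_parts.items() if f > 25]
--     lengths = list(dict.fromkeys(len(w) for w in kept))
--     return {L: [w for w in kept if len(w) == L] for L in lengths}
-- ===== Notes on version B (the rewrite author's own statement) =====
-- stated objective: alternative
-- what changed: A builds the grouping dict incrementally with a membership test and append per word; B first filters the frequent words, deduplicates their lengths in first-occurrence order, and builds each length bucket by a comprehension over the filtered list.
import Mathlib
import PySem

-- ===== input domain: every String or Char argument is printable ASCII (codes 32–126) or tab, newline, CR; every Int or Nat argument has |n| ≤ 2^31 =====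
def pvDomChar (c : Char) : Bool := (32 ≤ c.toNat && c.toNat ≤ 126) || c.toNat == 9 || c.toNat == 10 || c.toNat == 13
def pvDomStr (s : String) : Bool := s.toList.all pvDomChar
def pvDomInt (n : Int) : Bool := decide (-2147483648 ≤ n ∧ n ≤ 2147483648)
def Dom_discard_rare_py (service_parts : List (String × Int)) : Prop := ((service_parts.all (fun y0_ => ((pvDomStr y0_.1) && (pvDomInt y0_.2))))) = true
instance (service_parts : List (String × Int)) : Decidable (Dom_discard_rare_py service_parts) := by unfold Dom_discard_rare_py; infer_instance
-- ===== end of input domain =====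

-- B replaces A's incremental dict-building loop by filter-then-group: keep the frequent
-- words, dedup their lengths in first-occurrence order, and build each bucket by a scan
-- of the kept list (objective: alternative decomposition, not faster).

-- ===== PORT A =====
def discard_rare_py (service_parts : List (String × Int)) : List (Int × List String) :=
  (service_parts.foldl
    (fun (d : PySem.Dict Int (List String)) part =>
      let length : Int := PySem.Str.len part.1
      if part.2 > 25 then
        if d.contains length then
          d.modify length [] (fun l => l ++ [part.1])
        else
          d.insert length [part.1]
      else d)
    PySem.Dict.empty).items

-- ===== PORT B =====
def discard_rare_py_alt (service_parts : List (String × Int)) : List (Int × List String) :=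
  let kept := (service_parts.filter (fun p => decide (p.2 > 25))).map Prod.fst
  let lengths := PySem.Set.ofList (kept.map (fun w => PySem.Str.len w))
  lengths.map (fun L => (L, kept.filter (fun w => PySem.Str.len w == L)))

-- ===== PRECONDITION & SPEC =====
def Spec_discard_rare_py (service_parts : List (String × Int)) (out : List (Int × List String)) : Prop := out = discard_rare_py_alt service_parts
instance (service_parts : List (String × Int)) (out : List (Int × List String)) : Decidable (Spec_discard_rare_py service_parts out) := by unfold Spec_discard_rare_py; infer_instance

-- ===== CLAIM (what is proved, stated in full; the proofs are below) =====
def Claim_equal_discard_rare_py : Prop := ∀ (service_parts : List (String × Int)), Dom_discard_rare_py service_parts → Spec_discard_rare_py service_parts (discard_rare_py service_parts)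

-- ===== LEMMAS AND PROOFS =====

-- A's two branches are exactly Python's d[k] = d.get(k, []) + [w], i.e. one Dict.modify.
theorem branch_eq_modify (d : PySem.Dict Int (List String)) (k : Int) (w : String) :
    (if d.contains k then d.modify k [] (fun l => l ++ [w]) else d.insert k [w])
      = d.modify k [] (fun l => l ++ [w]) := by
  by_cases h : d.contains k
  · simp [h]
  · rw [if_neg h, PySem.Dict.modify, PySem.Dict.getD_of_not_contains]
    · simp
    · exact eq_false_of_ne_true h

theorem discard_rare_eq (service_parts : List (String × Int)) :
    discard_rare_py service_parts = discard_rare_py_alt service_parts := by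
  unfold discard_rare_py discard_rare_py_alt
  set kept := (service_parts.filter (fun p => decide (p.2 > 25))).map Prod.fst with hkept
  have hstepfun :
      (fun (d : PySem.Dict Int (List String)) (part : String × Int) =>
        let length : Int := PySem.Str.len part.1
        if part.2 > 25 then
          if d.contains length then d.modify length [] (fun l => l ++ [part.1])
          else d.insert length [part.1]
        else d)
      = (fun (d : PySem.Dict Int (List String)) (p : String × Int) =>
          if decide (p.2 > 25) then d.modify (PySem.Str.len p.1) [] (fun l => l ++ [p.1]) else d) := by
    funext d p
    by_cases h : p.2 > 25
    · simpa [h] using branch_eq_modify d (PySem.Str.len p.1) p.1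
    · simp [h]
  have hfold :
      service_parts.foldl
        (fun (d : PySem.Dict Int (List String)) part =>
          let length : Int := PySem.Str.len part.1
          if part.2 > 25 then
            if d.contains length then d.modify length [] (fun l => l ++ [part.1])
            else d.insert length [part.1]
          else d)
        PySem.Dict.empty
      = (kept.map (fun w => (PySem.Str.len w, w))).foldl
          (fun d q => d.modify q.1 [] (fun l => l ++ [q.2])) PySem.Dict.empty := by
    rw [hstepfun, ← List.foldl_filter, hkept, List.foldl_map, List.foldl_map]
  rw [hfold]
  set m := kept.map (fun w => (PySem.Str.len w, w)) with hm
  set D := m.foldl (fun d q => d.modify q.1 [] (fun l => l ++ [q.2])) PySem.Dict.empty with hD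
  have hnodup : D.keys.Nodup := by
    rw [hD, hm, List.foldl_map]
    exact PySem.Dict.nodup_keys_foldl_modify_key kept (fun w => PySem.Str.len w) []
      (fun d w => fun l => l ++ [w]) PySem.Dict.empty (by simp)
  have hkeys : D.keys = PySem.Set.ofList (kept.map (fun w => PySem.Str.len w)) := by
    rw [hD, hm, List.foldl_map]
    rw [PySem.Dict.keys_foldl_modify_key]
    simp [PySem.Set.update_nil_left]
  have hitems := PySem.Dict.items_eq_map_keys D hnodup []
  rw [hitems, hkeys]
  apply List.map_congr_left
  intro L _
  have hg : D.getD L [] = [] ++ (m.filter (fun q => q.1 == L)).map (fun q => q.2) := by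
    rw [hD]
    exact PySem.Dict.getD_foldl_modify_append m PySem.Dict.empty L
  rw [hg, hm]
  simp [List.filter_map, Function.comp_def]

-- ===== VERDICT (by name: the statement is the Claim_ definition above) =====
theorem discard_rare_py_spec : Claim_equal_discard_rare_py := by
  intro sp _
  exact discard_rare_eq sp
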